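-- pv_equiv track=rewrite | github.com/AlaFedor/Python-UJ | Zestaw 4/4.2.py | make_ruler
-- ===== SOURCE A (Python) =====
-- def make_ruler(n):
--     dlugosc = n
--     miarka = "|"
--     liczby = "0"
--
--     for i in range(dlugosc):
--         miarka +="....|"
--         odstęp = 5 - len(str(i+1))
--         liczby += " " * odstęp + str(i+1)
--
--     calosc = miarka +'\n'+ liczby
--
--     return calosc
-- ===== SOURCE B (Python) =====
-- def make_ruler(n):
--     return "|" + "....|" * n + "\n0" + ("%5d" * n) % tuple(range(1, n + 1))
-- ===== Notes on version B (the rewrite author's own statement) =====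
-- stated objective: simpler
-- what changed: A's fused per-index accumulation loop is replaced by a loop-free one-liner: the marks are the closed-form repetition '|' + '....|'*n and the whole numbers line is produced by a single %-format of the full tuple, ('%5d' * n) % tuple(range(1, n+1)).
import Mathlib
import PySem

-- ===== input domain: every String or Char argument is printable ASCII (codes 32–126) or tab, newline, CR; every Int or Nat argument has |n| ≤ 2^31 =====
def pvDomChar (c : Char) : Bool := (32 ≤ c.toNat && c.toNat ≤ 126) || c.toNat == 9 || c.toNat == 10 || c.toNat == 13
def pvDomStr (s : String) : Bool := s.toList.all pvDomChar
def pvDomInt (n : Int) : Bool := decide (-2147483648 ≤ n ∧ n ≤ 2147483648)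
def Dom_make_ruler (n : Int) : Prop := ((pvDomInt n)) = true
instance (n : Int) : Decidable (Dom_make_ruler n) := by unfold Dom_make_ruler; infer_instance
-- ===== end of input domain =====

-- B has no loop at all: the marks are the closed-form repetition "|" + "....|"*n and the
-- numbers line is ONE printf of the whole tuple, ("%5d"*n) % tuple(range(1,n+1)) (objective: simpler).

-- ===== PORT A =====
-- one loop iteration of A: append "....|" to miarka, append " "*(5-len(str(i+1))) + str(i+1) to liczby
def stepA (st : List Char × List Char) (i : Int) : List Char × List Char :=
  let s := PySem.Int.toChars (i + 1)
  (st.1 ++ ['.', '.', '.', '.', '|'],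
   st.2 ++ PySem.List.pyRepeat [' '] (5 - (s.length : Int)) ++ s)

def make_ruler (n : Int) : String :=
  let p := (PySem.List.pyRange 0 n 1).foldl stepA (['|'], ['0'])
  String.ofList (p.1 ++ '\n' :: p.2)

-- ===== PORT B =====
-- the %-formatting operator of B's '("%5d" * n) % tuple(range(1, n+1))': walk the format
-- string, each '%5d' consumes one argument and emits it right-justified to width 5
-- (exact for the '%5d'-only format strings B builds; other chars are copied verbatim)
def fmtInts : List Char → List Int → List Char
  | [], _ => []
  | '%' :: '5' :: 'd' :: rest, a :: args =>
      List.replicate (5 - (PySem.Int.toChars a).length) ' ' ++ PySem.Int.toChars a ++ fmtInts rest args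
  | c :: rest, args => c :: fmtInts rest args

def make_ruler_alt (n : Int) : String :=
  String.ofList ('|' :: PySem.List.pyRepeat ['.', '.', '.', '.', '|'] n
    ++ '\n' :: '0' :: fmtInts (PySem.List.pyRepeat ['%', '5', 'd'] n) (PySem.List.pyRange 1 (n + 1) 1))

-- ===== PRECONDITION & SPEC =====
def Spec_make_ruler (n : Int) (out : String) : Prop := out = make_ruler_alt n
instance (n : Int) (out : String) : Decidable (Spec_make_ruler n out) := by unfold Spec_make_ruler; infer_instance

-- ===== CLAIM =====
def Claim_equal_make_ruler : Prop := ∀ (n : Int), Dom_make_ruler n → Spec_make_ruler n (make_ruler n)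

-- ===== LEMMAS AND PROOFS =====

theorem loop_eq (m : Nat) :
    ((List.range m).map (fun k : Nat => (k : Int))).foldl stepA (['|'], ['0'])
    = ('|' :: (List.replicate m ['.', '.', '.', '.', '|']).flatten,
       '0' :: (((List.range m).map (fun k : Nat => (k : Int))).map
                 (fun i => List.replicate (5 - (PySem.Int.toChars (i + 1)).length) ' '
                           ++ PySem.Int.toChars (i + 1))).flatten) := by
  induction m with
  | zero => simp
  | succ m ih =>
      rw [List.range_succ, List.map_append, List.foldl_append, ih]
      simp [stepA, List.replicate_succ']

theorem fmt_eq (xs : List Int) :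
    fmtInts ((List.replicate xs.length ['%', '5', 'd']).flatten) xs
    = (xs.map (fun i => List.replicate (5 - (PySem.Int.toChars i).length) ' '
                        ++ PySem.Int.toChars i)).flatten := by
  induction xs with
  | nil => simp [fmtInts]
  | cons a xs ih => simp [List.replicate_succ, fmtInts, ih]

-- ===== VERDICT =====
theorem make_ruler_spec : Claim_equal_make_ruler := by
  intro n _
  unfold Spec_make_ruler make_ruler make_ruler_alt
  rw [PySem.List.pyRange_one, PySem.List.pyRange_one]
  have h0 : (fun k : Nat => (0 : Int) + k) = (fun k : Nat => (k : Int)) := by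
    funext k; omega
  have hn : n - 0 = n := by omega
  have hn1 : (n + 1 - 1).toNat = n.toNat := by omega
  have hlen : ((List.range n.toNat).map (fun k : Nat => (1 : Int) + k)).length = n.toNat := by
    simp
  have hfmt := fmt_eq ((List.range n.toNat).map (fun k : Nat => (1 : Int) + k))
  rw [hlen] at hfmt
  rw [h0, hn, hn1, loop_eq]
  simp only [PySem.List.pyRepeat]
  rw [hfmt]
  have hmap : ((List.range n.toNat).map (fun k : Nat => (k : Int))).map
        (fun i => List.replicate (5 - (PySem.Int.toChars (i + 1)).length) ' '
                  ++ PySem.Int.toChars (i + 1))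
      = ((List.range n.toNat).map (fun k : Nat => (1 : Int) + k)).map
        (fun i => List.replicate (5 - (PySem.Int.toChars i).length) ' '
                  ++ PySem.Int.toChars i) := by
    rw [List.map_map, List.map_map]
    refine List.map_congr_left ?_
    intro k _
    simp only [Function.comp]
    rw [show (1 : Int) + (k : Int) = (k : Int) + 1 from by ring]
  rw [hmap]
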